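-- pv_equiv track=rewrite | github.com/theSilvaPaulo/CMMatrixSolver | app/utils.py | conta_submatriz
-- ===== SOURCE A (Python) =====
-- def conta_submatriz(matriz, submatriz):
--     m = len(matriz)
--     n = len(matriz[0])
--     k = len(submatriz)
--     l = len(submatriz[0])
--     contagem = 0
--
--     for i in range(m - k + 1):
--         for j in range(n - l + 1):
--             encontrou = True
--             for linha in range(k):
--                 if matriz[i + linha][j:j + l] != submatriz[linha]:
--                     encontrou = False
--                     break
--             if encontrou:
--                 contagem += 1
--
--     return contagem
-- ===== SOURCE B (Python) =====
-- def conta_submatriz(matriz, submatriz):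
--     m = len(matriz)
--     n = len(matriz[0])
--     k = len(submatriz)
--     l = len(submatriz[0])
--     # index the distinct submatrix rows once; compare integer ids instead of slices
--     ids = {}
--     pat = []
--     for row in submatriz:
--         key = tuple(row)
--         if key not in ids:
--             ids[key] = len(ids)
--         pat.append(ids[key])
--     rid = [[ids.get(tuple(row[j:j + l]), -1) for j in range(n - l + 1)]
--            for row in matriz]
--     contagem = 0
--     for j in range(n - l + 1):
--         for i in range(m - k + 1):
--             if all(rid[i + t][j] == pat[t] for t in range(k)):
--                 contagem += 1
--     return contagem
-- ===== Notes on version B (the rewrite author's own statement) =====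
-- stated objective: alternative
-- what changed: B first indexes the distinct submatrix rows in a dict and precomputes a matrix of row ids (one slice comparison per cell instead of up to k), then counts matches by comparing integer id columns, traversing column-major instead of row-major.
import Mathlib
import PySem

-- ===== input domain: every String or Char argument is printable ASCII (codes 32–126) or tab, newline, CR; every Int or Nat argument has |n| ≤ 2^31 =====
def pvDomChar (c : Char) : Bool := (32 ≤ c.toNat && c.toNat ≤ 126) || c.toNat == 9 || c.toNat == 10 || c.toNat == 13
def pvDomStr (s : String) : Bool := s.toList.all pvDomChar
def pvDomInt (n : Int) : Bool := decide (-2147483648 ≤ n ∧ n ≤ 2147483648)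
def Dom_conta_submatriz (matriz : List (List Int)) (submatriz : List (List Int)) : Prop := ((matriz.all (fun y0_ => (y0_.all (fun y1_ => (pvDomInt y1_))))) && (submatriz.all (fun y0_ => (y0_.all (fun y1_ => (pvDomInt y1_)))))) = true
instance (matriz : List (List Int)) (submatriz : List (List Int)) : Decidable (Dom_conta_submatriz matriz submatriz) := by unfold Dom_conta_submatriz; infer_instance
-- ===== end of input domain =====

-- B replaces A's per-window slice comparisons by a dict index of the distinct submatrix rows plus a
-- precomputed matrix of row ids, counted column-major; equivalence of the two counts is proved below.

-- ===== PORT A =====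
-- the inner 'for linha in range(k)' loop with its break, as a structural recursion over the range list
def pvEncontrouA (matriz submatriz : List (List Int)) (i j l : Int) : List Int → Bool
  | [] => true
  | linha :: rest =>
      if PySem.List.slice (PySem.List.pyGetD matriz (i + linha) []) (some j) (some (j + l))
           ≠ PySem.List.pyGetD submatriz linha [] then false
      else pvEncontrouA matriz submatriz i j l rest

def conta_submatriz (matriz : List (List Int)) (submatriz : List (List Int)) : Int :=
  let m : Int := matriz.length
  let n : Int := (PySem.List.pyGetD matriz 0 []).length     -- matriz[0]: in range under Pre_
  let k : Int := submatriz.length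
  let l : Int := (PySem.List.pyGetD submatriz 0 []).length  -- submatriz[0]: in range under Pre_
  (PySem.List.pyRange 0 (m - k + 1) 1).foldl (fun contagem i =>
    (PySem.List.pyRange 0 (n - l + 1) 1).foldl (fun contagem j =>
      if pvEncontrouA matriz submatriz i j l (PySem.List.pyRange 0 k 1) then contagem + 1
      else contagem) contagem) 0

-- ===== PORT B =====
-- Source B's first loop body: conditional insert of a fresh id, then append ids[key] to pat
-- (ids[key] after the conditional insert is always present; getD with -1 is its total form)
def pvStep (st : PySem.Dict (List Int) Int × List Int) (row : List Int) :
    PySem.Dict (List Int) Int × List Int :=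
  let ids := if st.1.contains row then st.1 else st.1.insert row (st.1.size : Int)
  (ids, st.2 ++ [ids.getD row (-1)])

def pvBuildIds (rows : List (List Int)) : PySem.Dict (List Int) Int × List Int :=
  rows.foldl pvStep (PySem.Dict.empty, [])

-- Source B's rid comprehension
def pvRid (matriz : List (List Int)) (ids : PySem.Dict (List Int) Int) (n l : Int) :
    List (List Int) :=
  matriz.map (fun row =>
    (PySem.List.pyRange 0 (n - l + 1) 1).map (fun j =>
      ids.getD (PySem.List.slice row (some j) (some (j + l))) (-1)))

def conta_submatriz_alt (matriz : List (List Int)) (submatriz : List (List Int)) : Int :=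
  let m : Int := matriz.length
  let n : Int := (PySem.List.pyGetD matriz 0 []).length     -- matriz[0]: in range under Pre_
  let k : Int := submatriz.length
  let l : Int := (PySem.List.pyGetD submatriz 0 []).length  -- submatriz[0]: in range under Pre_
  let st := pvBuildIds submatriz
  let ids := st.1
  let pat := st.2
  let rid := pvRid matriz ids n l
  (PySem.List.pyRange 0 (n - l + 1) 1).foldl (fun contagem j =>
    (PySem.List.pyRange 0 (m - k + 1) 1).foldl (fun contagem i =>
      if (PySem.List.pyRange 0 k 1).all (fun t =>
            PySem.List.pyGetD (PySem.List.pyGetD rid (i + t) []) j 0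
              == PySem.List.pyGetD pat t 0) then contagem + 1
      else contagem) contagem) 0

-- ===== PRECONDITION & SPEC =====
-- Pre_ excludes exactly the inputs on which Python A raises IndexError: matriz[0] / submatriz[0] on an empty list
def Pre_conta_submatriz (matriz : List (List Int)) (submatriz : List (List Int)) : Prop :=
  matriz ≠ [] ∧ submatriz ≠ []
instance (matriz : List (List Int)) (submatriz : List (List Int)) : Decidable (Pre_conta_submatriz matriz submatriz) := by unfold Pre_conta_submatriz; infer_instance

def pvWitness_conta_submatriz : List (List Int) × List (List Int) := ([[1, 2], [3, 4]], [[1, 2]])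

def Spec_conta_submatriz (matriz : List (List Int)) (submatriz : List (List Int)) (out : Int) : Prop := out = conta_submatriz_alt matriz submatriz
instance (matriz : List (List Int)) (submatriz : List (List Int)) (out : Int) : Decidable (Spec_conta_submatriz matriz submatriz out) := by unfold Spec_conta_submatriz; infer_instance

-- ===== CLAIM (what is proved, stated in full; the proofs are below) =====
def Claim_equal_conta_submatriz : Prop := ∀ (matriz : List (List Int)) (submatriz : List (List Int)), Dom_conta_submatriz matriz submatriz → Pre_conta_submatriz matriz submatriz → Spec_conta_submatriz matriz submatriz (conta_submatriz matriz submatriz)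

-- ===== LEMMAS AND PROOFS =====

-- invariant of the dict built by pvStep: values nonnegative and below the size, distinct keys get distinct values
def pvInv (d : PySem.Dict (List Int) Int) : Prop :=
  (∀ x v, d.get? x = some v → 0 ≤ v ∧ v < (d.size : Int)) ∧
  (∀ x y v, d.get? x = some v → d.get? y = some v → x = y)

theorem pvInv_empty : pvInv PySem.Dict.empty := by
  constructor <;> intro x <;> intros <;> simp_all [PySem.Dict.get?_empty]

theorem pvStep_inv (d : PySem.Dict (List Int) Int) (row : List Int) (h : pvInv d) :
    pvInv (if d.contains row then d else d.insert row (d.size : Int)) := by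
  split
  · exact h
  · next hc =>
    obtain ⟨hb, hinj⟩ := h
    have hsz : (d.insert row (d.size : Int)).size = d.size + 1 := by
      rw [PySem.Dict.size_insert]; simp [hc]
    constructor
    · intro x v hx
      rw [PySem.Dict.get?_insert] at hx
      split at hx
      · cases hx
        constructor
        · exact Int.natCast_nonneg _
        · rw [hsz]; push_cast; omega
      · have := hb x v hx
        rw [hsz]; push_cast; omega
    · intro x y v hx hy
      rw [PySem.Dict.get?_insert] at hx hy
      by_cases hxr : x = row <;> by_cases hyr : y = row
      · rw [hxr, hyr]
      · rw [if_pos hxr] at hx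
        rw [if_neg hyr] at hy
        injection hx with hx
        have := (hb y v hy).2
        omega
      · rw [if_neg hxr] at hx
        rw [if_pos hyr] at hy
        injection hy with hy
        have := (hb x v hx).2
        omega
      · rw [if_neg hxr] at hx
        rw [if_neg hyr] at hy
        exact hinj x y v hx hy

theorem pvStep_mono (d : PySem.Dict (List Int) Int) (row : List Int) (x : List Int) (v : Int)
    (hx : d.get? x = some v) :
    (if d.contains row then d else d.insert row (d.size : Int)).get? x = some v := by
  split
  · exact hx
  · next hc =>
    rw [PySem.Dict.get?_insert]
    split
    · next hxr =>
      subst hxr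
      rw [PySem.Dict.contains_eq_isSome_get?, hx] at hc
      simp at hc
    · exact hx

theorem pvStep_present (d : PySem.Dict (List Int) Int) (row : List Int) :
    ((if d.contains row then d else d.insert row (d.size : Int)).get? row).isSome := by
  split
  · next hc => rwa [PySem.Dict.contains_eq_isSome_get?] at hc
  · rw [PySem.Dict.get?_insert]; simp

theorem pvBuild_go (rows : List (List Int)) :
    ∀ (d : PySem.Dict (List Int) Int) (p : List Int), pvInv d →
    pvInv (rows.foldl pvStep (d, p)).1 ∧
    (∀ x v, d.get? x = some v → (rows.foldl pvStep (d, p)).1.get? x = some v) ∧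
    (rows.foldl pvStep (d, p)).2
      = p ++ rows.map (fun r => (rows.foldl pvStep (d, p)).1.getD r (-1)) ∧
    (∀ r ∈ rows, ((rows.foldl pvStep (d, p)).1.get? r).isSome) := by
  induction rows with
  | nil => intro d p h; simp [h]
  | cons row rest ih =>
    intro d p h
    set d1 := if d.contains row then d else d.insert row (d.size : Int) with hd1
    have hinv1 : pvInv d1 := by rw [hd1]; exact pvStep_inv d row h
    have hrow1 : (d1.get? row).isSome := by rw [hd1]; exact pvStep_present d row
    rcases hv : d1.get? row with _ | v
    · rw [hv] at hrow1; simp at hrow1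
    set q := d1.getD row (-1) with hq
    have hqv : q = v := by rw [hq, PySem.Dict.getD_eq_get?_getD, hv]; rfl
    have hfold : List.foldl pvStep (d, p) (row :: rest)
        = List.foldl pvStep (d1, p ++ [q]) rest := rfl
    obtain ⟨hI, hM, hP, hS⟩ := ih d1 (p ++ [q]) hinv1
    have hrowF : (List.foldl pvStep (d1, p ++ [q]) rest).1.get? row = some v := hM row v hv
    rw [hfold]
    refine ⟨hI, ?_, ?_, ?_⟩
    · intro x w hx
      have hx1 := pvStep_mono d row x w hx
      rw [← hd1] at hx1
      exact hM x w hx1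
    · rw [hP]
      have hg : (List.foldl pvStep (d1, p ++ [q]) rest).1.getD row (-1) = v := by
        rw [PySem.Dict.getD_eq_get?_getD, hrowF]; rfl
      rw [List.map_cons, hg, hqv]
      simp
    · intro r hr
      rcases List.mem_cons.mp hr with hr | hr
      · subst hr; rw [hrowF]; rfl
      · exact hS r hr

-- distinct ids characterise row equality: comparing the id of any slice with the id of a submatrix row
theorem pvKey (rows : List (List Int)) (s r : List Int) (hr : r ∈ rows) :
    ((pvBuildIds rows).1.getD s (-1) = (pvBuildIds rows).1.getD r (-1)) ↔ s = r := by
  have hB : pvBuildIds rows = rows.foldl pvStep (PySem.Dict.empty, []) := rfl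
  rw [hB]
  obtain ⟨hI, _, _, hS⟩ := pvBuild_go rows PySem.Dict.empty [] pvInv_empty
  have hrs := hS r hr
  rcases hv : (rows.foldl pvStep (PySem.Dict.empty, [])).1.get? r with _ | v
  · rw [hv] at hrs; simp at hrs
  have hgr : (rows.foldl pvStep (PySem.Dict.empty, [])).1.getD r (-1) = v := by
    rw [PySem.Dict.getD_eq_get?_getD, hv]; rfl
  have hv0 : 0 ≤ v := (hI.1 r v hv).1
  constructor
  · intro he
    rcases hw : (rows.foldl pvStep (PySem.Dict.empty, [])).1.get? s with _ | w
    · rw [PySem.Dict.getD_eq_get?_getD, hw, hgr] at he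
      simp at he; omega
    · have hgs : (rows.foldl pvStep (PySem.Dict.empty, [])).1.getD s (-1) = w := by
        rw [PySem.Dict.getD_eq_get?_getD, hw]; rfl
      rw [hgs, hgr] at he
      subst he
      exact hI.2 s r w hw hv
  · intro he; rw [he]

-- pat is the list of final ids of the submatrix rows
theorem pvPat (rows : List (List Int)) :
    (pvBuildIds rows).2 = rows.map (fun r => (pvBuildIds rows).1.getD r (-1)) := by
  have hB : pvBuildIds rows = rows.foldl pvStep (PySem.Dict.empty, []) := rfl
  rw [hB]
  obtain ⟨_, _, hP, _⟩ := pvBuild_go rows PySem.Dict.empty [] pvInv_empty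
  simpa using hP

-- A's break loop is an 'all' over the same range
theorem pvEnc_eq_all (matriz submatriz : List (List Int)) (i j l : Int) (ts : List Int) :
    pvEncontrouA matriz submatriz i j l ts
      = ts.all (fun t =>
          PySem.List.slice (PySem.List.pyGetD matriz (i + t) []) (some j) (some (j + l))
            == PySem.List.pyGetD submatriz t []) := by
  induction ts with
  | nil => rfl
  | cons t rest ih =>
    rw [pvEncontrouA, List.all_cons, ih]
    split
    · next h => simp [h]
    · next h => simp at h; simp [h]

-- a sum of counts over a product commutes: row-major and column-major counting agree
theorem pvSumComm (xs ys : List Int) (p : Int → Int → Bool) :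
    (xs.map (fun x => ((ys.countP (p x) : Int)))).sum
      = (ys.map (fun y => ((xs.countP (fun x => p x y) : Int)))).sum := by
  induction xs with
  | nil => simp
  | cons x tail ih =>
    simp only [List.map_cons, List.sum_cons, ih]
    have hpt : ∀ y ∈ ys, ((x :: tail).countP (fun x' => p x' y) : Int)
        = (if p x y then (1 : Int) else 0) + ((tail.countP (fun x' => p x' y) : Int)) := by
      intro y _
      rw [List.countP_cons]
      split <;> push_cast <;> ring
    rw [List.map_congr_left hpt, PySem.List.sum_map_add_int,
      PySem.List.sum_map_ite_one_zero]

-- a fold of nested count-loops is a sum of counts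
theorem pvFold2 (I J : Int) (f : Int → Int → Bool) :
    (PySem.List.pyRange 0 I 1).foldl (fun a i =>
        (PySem.List.pyRange 0 J 1).foldl (fun a j => if f i j then a + 1 else a) a) 0
      = ((PySem.List.pyRange 0 I 1).map
          (fun i => (((PySem.List.pyRange 0 J 1).countP (f i) : Int)))).sum := by
  rw [PySem.List.foldl_congr_mem (PySem.List.pyRange 0 I 1) _
      (fun a i => a + ((PySem.List.pyRange 0 J 1).countP (f i) : Int)) 0
      (fun a i _ => PySem.List.foldl_count_if (f i) _ a)]
  rw [PySem.List.foldl_add]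
  ring

-- the per-cell comparison of ids equals the per-cell comparison of slices
theorem pvPoint (M S : List (List Int)) (n l : Int) (i j : Int)
    (hi : 0 ≤ i) (hik : i + (S.length : Int) ≤ (M.length : Int))
    (hj : 0 ≤ j) (hjn : j < n - l + 1) :
    ((PySem.List.pyRange 0 (S.length : Int) 1).all (fun t =>
        PySem.List.pyGetD (PySem.List.pyGetD (pvRid M (pvBuildIds S).1 n l) (i + t) []) j 0
          == PySem.List.pyGetD (pvBuildIds S).2 t 0))
      = ((PySem.List.pyRange 0 (S.length : Int) 1).all (fun t =>
        PySem.List.slice (PySem.List.pyGetD M (i + t) []) (some j) (some (j + l))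
          == PySem.List.pyGetD S t [])) := by
  have pvT : ∀ t ∈ PySem.List.pyRange 0 (S.length : Int) 1,
      (PySem.List.pyGetD (PySem.List.pyGetD (pvRid M (pvBuildIds S).1 n l) (i + t) []) j 0
          == PySem.List.pyGetD (pvBuildIds S).2 t 0)
        = (PySem.List.slice (PySem.List.pyGetD M (i + t) []) (some j) (some (j + l))
          == PySem.List.pyGetD S t []) := by
    intro t ht
    obtain ⟨ht0, htk⟩ := PySem.List.mem_pyRange_one.mp ht
    have hitM : i + t < (M.length : Int) := by omega
    have hit0 : 0 ≤ i + t := by omega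
    have hridlen : i + t < ((pvRid M (pvBuildIds S).1 n l).length : Int) := by
      rw [pvRid, List.length_map]; exact hitM
    have htS : t < ((S.length : Int)) := htk
    have htpat : t < (((pvBuildIds S).2.length : Int)) := by
      rw [pvPat, List.length_map]; exact htS
    have htSn : t.toNat < S.length := by omega
    have hitMn : (i + t).toNat < M.length := by omega
    rw [PySem.List.pyGetD_eq_getElem _ _ hit0 hridlen,
        PySem.List.pyGetD_eq_getElem _ _ hit0 hitM,
        PySem.List.pyGetD_eq_getElem _ _ ht0 htpat,
        PySem.List.pyGetD_eq_getElem _ _ ht0 (by rwa [Int.lt_iff_add_one_le] at htS ⊢)]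
    simp only [pvRid, List.getElem_map]
    rw [PySem.List.pyGetD_map_pyRange_of_nonneg _ _ _ _ hj hjn]
    have hpat2 : (pvBuildIds S).2[t.toNat]'(by rw [pvPat, List.length_map]; exact htSn)
        = (pvBuildIds S).1.getD (S[t.toNat]'htSn) (-1) := by
      have := pvPat S
      rw [List.getElem_of_eq this, List.getElem_map]
    rw [hpat2]
    rw [Bool.eq_iff_iff, beq_iff_eq, beq_iff_eq]
    exact pvKey S _ _ (List.getElem_mem htSn)
  rw [Bool.eq_iff_iff]
  simp only [List.all_eq_true]
  constructor
  · intro h t ht; rw [← pvT t ht]; exact h t ht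
  · intro h t ht; rw [pvT t ht]; exact h t ht

-- ===== VERDICT (by name: the statement is the Claim_ definition above) =====
theorem conta_submatriz_spec : Claim_equal_conta_submatriz := by
  unfold Claim_equal_conta_submatriz
  intro M S _ hPre
  unfold Spec_conta_submatriz conta_submatriz conta_submatriz_alt
  simp only []
  rw [pvFold2 ((M.length : Int) - (S.length : Int) + 1)
        (((PySem.List.pyGetD M 0 []).length : Int) - ((PySem.List.pyGetD S 0 []).length : Int) + 1)
        (fun i j => pvEncontrouA M S i j ((PySem.List.pyGetD S 0 []).length : Int)
          (PySem.List.pyRange 0 (S.length : Int) 1)),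
      pvFold2 (((PySem.List.pyGetD M 0 []).length : Int) - ((PySem.List.pyGetD S 0 []).length : Int) + 1)
        ((M.length : Int) - (S.length : Int) + 1)
        (fun j i => (PySem.List.pyRange 0 (S.length : Int) 1).all (fun t =>
          PySem.List.pyGetD (PySem.List.pyGetD
            (pvRid M (pvBuildIds S).1 ((PySem.List.pyGetD M 0 []).length : Int)
              ((PySem.List.pyGetD S 0 []).length : Int)) (i + t) []) j 0
            == PySem.List.pyGetD (pvBuildIds S).2 t 0))]
  rw [pvSumComm]
  refine congrArg List.sum (List.map_congr_left ?_)
  intro j hj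
  obtain ⟨hj0, hjn⟩ := PySem.List.mem_pyRange_one.mp hj
  refine congrArg Int.ofNat (List.countP_congr ?_)
  intro i hi
  obtain ⟨hi0, him⟩ := PySem.List.mem_pyRange_one.mp hi
  rw [pvEnc_eq_all]
  rw [← pvPoint M S _ _ i j hi0 (by omega) hj0 hjn]
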